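-- pv_equiv track=rewrite | github.com/JdelgadoM/rutgen | genrut.py | generarut
-- ===== SOURCE A (Python) =====
-- def generarut(desde, hasta):
--
--     arreglo = []
--
--     for i in range(desde, hasta):
--         total = 0
--         multiplo = 2
--         rut = str(i)
--         for rinverso in reversed(rut):
--             total += int(rinverso) * multiplo
--
--             if multiplo == 7:
--                 multiplo = 2
--             else:
--                 multiplo += 1
--
--             modulus = total % 11
--             verificador = 11 - modulus
--
--             if verificador == 10:
--                 div = "k"
--             elif verificador == 11:
--                 div = "0"
--             elif verificador < 10:
--                 div = verificador
--
--         arreglo.append(rut + str(div))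
--
--     return arreglo
-- ===== SOURCE B (Python) =====
-- def generarut(desde, hasta):
--     out = []
--     if desde >= hasta:
--         return out
--     # odometer: little-endian digit list of the current number and its
--     # running weighted sum (weights 2,3,4,5,6,7 cycling by position),
--     # both updated in O(1) amortized per step instead of recomputed.
--     digits = [int(c) for c in reversed(str(desde))]
--     total = sum(d * (2 + k % 6) for k, d in enumerate(digits))
--     i = desde
--     while i < hasta:
--         v = 11 - total % 11
--         dv = "k" if v == 10 else "0" if v == 11 else str(v)
--         out.append(str(i) + dv)
--         i += 1
--         k = 0
--         while True:
--             w = 2 + k % 6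
--             if digits[k] == 9:
--                 total -= 9 * w
--                 digits[k] = 0
--                 k += 1
--                 if k == len(digits):
--                     digits.append(0)
--             else:
--                 digits[k] += 1
--                 total += w
--                 break
--     return out
-- ===== Notes on version B (the rewrite author's own statement) =====
-- stated objective: alternative
-- what changed: B replaces A's per-number reversed-character weighted re-summation with an odometer: it keeps the current number's little-endian digit list and its weighted digit sum (weights 2..7 cycling) as running state and updates both incrementally by carry propagation when stepping to the next integer, so the weighted sum is never recomputed from scratch.
import Mathlib
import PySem

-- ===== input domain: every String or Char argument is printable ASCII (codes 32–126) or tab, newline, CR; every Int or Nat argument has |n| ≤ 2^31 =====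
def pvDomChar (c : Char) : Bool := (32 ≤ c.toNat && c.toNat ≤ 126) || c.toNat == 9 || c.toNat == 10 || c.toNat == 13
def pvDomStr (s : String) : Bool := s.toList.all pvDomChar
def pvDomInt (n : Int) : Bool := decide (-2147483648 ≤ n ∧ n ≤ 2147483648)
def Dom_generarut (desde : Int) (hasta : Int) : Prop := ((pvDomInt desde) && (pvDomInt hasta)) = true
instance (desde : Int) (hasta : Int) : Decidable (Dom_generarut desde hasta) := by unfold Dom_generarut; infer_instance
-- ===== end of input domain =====

-- B is an odometer: it keeps the current number's little-endian digit list and its weighted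
-- digit sum as running state, updating both incrementally with carry propagation instead of
-- recomputing the weighted sum from each number's string as A does (objective: alternative).

-- ===== PORT A =====
-- Literal port of A. int(rinverso) is PySem.Int.ofChars? [c]; it is none (ValueError) on the
-- '-' sign character of a negative i, exactly the inputs Pre_ excludes; .getD 0 only stands in
-- for the raise outside Pre_. div starts as "" (Python leaves it unbound; the inner loop always
-- runs at least once, so the initial value is never used), and str(div) is applied at bind time.
def generarut (desde : Int) (hasta : Int) : List String :=
  (PySem.List.pyRange desde hasta 1).foldl (fun arreglo i =>
    let rut := PySem.Int.toStr i
    let st := rut.toList.reverse.foldl (fun (s : Int × Int × String) c =>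
      let total := s.1 + ((PySem.Int.ofChars? [c]).getD 0) * s.2.1
      let multiplo := if s.2.1 == 7 then 2 else s.2.1 + 1
      let modulus := PySem.Int.mod total 11
      let verificador := 11 - modulus
      let div := if verificador == 10 then "k"
                 else if verificador == 11 then "0"
                 else if verificador < 10 then PySem.Int.toStr verificador
                 else s.2.2
      (total, multiplo, div)) (0, 2, "")
    arreglo ++ [rut ++ st.2.2]) []

-- ===== PORT B =====
-- The inner while-True carry loop of Source B, as structural recursion on the digit list
-- (index k walks up the list; reaching the end appends a fresh digit that is then set to 1).
-- Returns the new digit list and the change of the weighted total.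
def pvInc (ds : List Int) (k : Int) : List Int × Int :=
  match ds with
  | [] => ([1], 2 + PySem.Int.mod k 6)
  | d :: rest =>
      if d == 9 then
        let p := pvInc rest (k + 1)
        (0 :: p.1, p.2 - 9 * (2 + PySem.Int.mod k 6))
      else ((d + 1) :: rest, 2 + PySem.Int.mod k 6)

-- The outer while-loop of Source B; fuel = number of remaining iterations (hasta - i).
def pvGenLoop (fuel : Nat) (i : Int) (ds : List Int) (t : Int) (out : List String) : List String :=
  match fuel with
  | 0 => out
  | Nat.succ f =>
      let v := 11 - PySem.Int.mod t 11
      let dv := if v == 10 then "k" else if v == 11 then "0" else PySem.Int.toStr v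
      let out' := out ++ [PySem.Int.toStr i ++ dv]
      let p := pvInc ds 0
      pvGenLoop f (i + 1) p.1 (t + p.2) out'

def generarut_alt (desde : Int) (hasta : Int) : List String :=
  if desde ≥ hasta then []
  else
    let ds := (PySem.Int.toStr desde).toList.reverse.map
      (fun c => (PySem.Int.ofChars? [c]).getD 0)
    let t := (PySem.List.enumerate ds 0).foldl
      (fun acc p => acc + p.2 * (2 + PySem.Int.mod p.1 6)) 0
    pvGenLoop (hasta - desde).toNat desde ds t []

-- ===== PRECONDITION & SPEC =====
-- A raises ValueError (int('-')) as soon as the range contains a negative integer;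
-- Pre_ admits exactly the inputs where every generated i is nonnegative (or the range is empty).
def Pre_generarut (desde : Int) (hasta : Int) : Prop := 0 ≤ desde ∨ hasta ≤ desde
instance (desde : Int) (hasta : Int) : Decidable (Pre_generarut desde hasta) := by unfold Pre_generarut; infer_instance
def pvWitness_generarut : Int × Int := (7, 23)

def Spec_generarut (desde : Int) (hasta : Int) (out : List String) : Prop := out = generarut_alt desde hasta
instance (desde : Int) (hasta : Int) (out : List String) : Decidable (Spec_generarut desde hasta out) := by unfold Spec_generarut; infer_instance

-- ===== CLAIM (what is proved, stated in full; the proofs are below) =====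
def Claim_equal_generarut : Prop := ∀ (desde : Int) (hasta : Int), Dom_generarut desde hasta → Pre_generarut desde hasta → Spec_generarut desde hasta (generarut desde hasta)

-- ===== LEMMAS AND PROOFS =====

-- Decimal digit characters of n, most significant first (= Nat.toDigits 10 n).
def pvD (n : Nat) : List Char :=
  if _h : n < 10 then [Nat.digitChar n]
  else pvD (n / 10) ++ [Nat.digitChar (n % 10)]
decreasing_by exact Nat.div_lt_self (by omega) (by omega)

-- Decimal digits of n as integers, least significant first.
def pvND (n : Nat) : List Int :=
  if _h : n < 10 then [(n : Int)]
  else ((n % 10 : Nat) : Int) :: pvND (n / 10)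
decreasing_by exact Nat.div_lt_self (by omega) (by omega)

-- Weighted sum of a digit list whose first element sits at position k.
def pvWS (k : Nat) : List Int → Int
  | [] => 0
  | d :: r => d * (2 + ((k % 6 : Nat) : Int)) + pvWS (k + 1) r

theorem pvD_small {n : Nat} (h : n < 10) : pvD n = [Nat.digitChar n] := by
  rw [pvD, dif_pos h]

theorem pvD_large {n : Nat} (h : ¬ n < 10) :
    pvD n = pvD (n / 10) ++ [Nat.digitChar (n % 10)] := by
  rw [pvD, dif_neg h]

theorem pvND_small {n : Nat} (h : n < 10) : pvND n = [(n : Int)] := by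
  rw [pvND, dif_pos h]

theorem pvND_large {n : Nat} (h : ¬ n < 10) :
    pvND n = ((n % 10 : Nat) : Int) :: pvND (n / 10) := by
  rw [pvND, dif_neg h]

theorem pvToDigitsCore_eq (f : Nat) : ∀ (n : Nat) (l : List Char), n < f →
    Nat.toDigitsCore 10 f n l = pvD n ++ l := by
  induction f with
  | zero => intro n l h; omega
  | succ f ih =>
    intro n l h
    rw [Nat.toDigitsCore]
    by_cases h10 : n / 10 = 0
    · rw [if_pos h10, pvD_small (by omega), Nat.mod_eq_of_lt (by omega)]
      simp
    · rw [if_neg h10, ih (n / 10) _ (by omega), pvD_large (n := n) (by omega)]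
      simp

theorem pvToChars_nonneg (i : Int) (h : 0 ≤ i) :
    (PySem.Int.toStr i).toList = pvD i.toNat := by
  rw [PySem.Int.toList_toStr, PySem.Int.toChars, if_neg (by omega), Nat.toDigits,
    pvToDigitsCore_eq _ _ _ (Nat.lt_succ_self _), List.append_nil]

theorem pvOfChars_digitChar (d : Nat) (hd : d < 10) :
    PySem.Int.ofChars? [Nat.digitChar d] = some (d : Int) := by
  interval_cases d <;> decide

-- A's inner per-character fold step (definitionally the lambda inside generarut).
def pvStepA (s : Int × Int × String) (c : Char) : Int × Int × String :=
  let total := s.1 + ((PySem.Int.ofChars? [c]).getD 0) * s.2.1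
  let multiplo := if s.2.1 == 7 then 2 else s.2.1 + 1
  let modulus := PySem.Int.mod total 11
  let verificador := 11 - modulus
  let div := if verificador == 10 then "k"
             else if verificador == 11 then "0"
             else if verificador < 10 then PySem.Int.toStr verificador
             else s.2.2
  (total, multiplo, div)

-- The check-digit string from a weighted total.
def pvDv (t : Int) : String :=
  let v := 11 - PySem.Int.mod t 11
  if v == 10 then "k" else if v == 11 then "0" else PySem.Int.toStr v

-- The value both programs produce for one integer i ≥ 0.
def pvElem (i : Int) : String := PySem.Int.toStr i ++ pvDv (pvWS 0 (pvND i.toNat))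

theorem pvDiv_eq (t : Int) (s0 : String) :
    (if (11 - PySem.Int.mod t 11) == 10 then "k"
     else if (11 - PySem.Int.mod t 11) == 11 then "0"
     else if (11 - PySem.Int.mod t 11) < 10 then PySem.Int.toStr (11 - PySem.Int.mod t 11)
     else s0) = pvDv t := by
  have h2 := PySem.Int.mod_nonneg t (b := 11) (by norm_num)
  have h3 := PySem.Int.mod_lt t (b := 11) (by norm_num)
  unfold pvDv
  simp only [beq_iff_eq]
  split_ifs <;> first | rfl | omega

theorem pvStepA_digit (t m : Int) (s0 : String) (d : Nat) (hd : d < 10) :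
    pvStepA (t, m, s0) (Nat.digitChar d) =
      (t + (d : Int) * m, (if m == 7 then 2 else m + 1), pvDv (t + (d : Int) * m)) := by
  unfold pvStepA
  simp only [pvOfChars_digitChar d hd, Option.getD_some]
  rw [pvDiv_eq]

theorem pvModCast (k : Nat) : PySem.Int.mod (k : Int) 6 = ((k % 6 : Nat) : Int) := by
  exact_mod_cast PySem.Int.mod_natCast k 6

-- the three-branch check-digit if-chain of Source B is pvDv by definition
theorem pvDv3 (t : Int) :
    (if (11 - PySem.Int.mod t 11) == 10 then "k"
     else if (11 - PySem.Int.mod t 11) == 11 then "0"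
     else PySem.Int.toStr (11 - PySem.Int.mod t 11)) = pvDv t := rfl

-- A's multiplier update keeps the invariant multiplo = 2 + k % 6.
theorem pvMultStep (k : Nat) :
    (if (2 + ((k % 6 : Nat) : Int)) == 7 then 2 else (2 + ((k % 6 : Nat) : Int)) + 1)
      = 2 + (((k + 1) % 6 : Nat) : Int) := by
  have h1 : (k + 1) % 6 = (k % 6 + 1) % 6 := by omega
  have h5 : k % 6 = 0 ∨ k % 6 = 1 ∨ k % 6 = 2 ∨ k % 6 = 3 ∨ k % 6 = 4 ∨ k % 6 = 5 := by omega
  rcases h5 with h | h | h | h | h | h <;> rw [h1, h] <;> decide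

-- A's inner fold computes the weighted digit sum and pvDv of it.
theorem pvFoldA (n : Nat) : ∀ (k : Nat) (t : Int) (s0 : String),
    List.foldl pvStepA (t, 2 + ((k % 6 : Nat) : Int), s0) (pvD n).reverse
      = (t + pvWS k (pvND n), 2 + (((k + (pvND n).length) % 6 : Nat) : Int),
         pvDv (t + pvWS k (pvND n))) := by
  induction n using Nat.strong_induction_on with
  | _ n ih =>
    intro k t s0
    by_cases h : n < 10
    · rw [pvD_small h, pvND_small h]
      simp only [List.reverse_singleton, List.foldl_cons, List.foldl_nil,
        pvStepA_digit _ _ _ n h, pvMultStep k, pvWS, List.length_singleton]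
      ring_nf
    · rw [pvD_large h, pvND_large h]
      simp only [List.reverse_append, List.reverse_singleton, List.singleton_append,
        List.foldl_cons, pvStepA_digit _ _ _ (n % 10) (Nat.mod_lt n (by omega)),
        pvMultStep k]
      rw [ih (n / 10) (Nat.div_lt_self (by omega) (by omega)) (k + 1)]
      simp only [pvWS, List.length_cons, Prod.mk.injEq]
      refine ⟨by ring, by congr 2; omega, by congr 1; ring⟩

-- generarut, with its inline step lambda recognised as pvStepA (definitional equality).
theorem pvGenerarut_eq (desde hasta : Int) :
    generarut desde hasta =
      (PySem.List.pyRange desde hasta 1).foldl (fun arreglo i =>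
        arreglo ++ [PySem.Int.toStr i ++
          ((PySem.Int.toStr i).toList.reverse.foldl pvStepA (0, 2, "")).2.2]) [] := rfl

-- A's element for a nonnegative i.
theorem pvA_elem (i : Int) (h : 0 ≤ i) :
    PySem.Int.toStr i ++
      ((PySem.Int.toStr i).toList.reverse.foldl pvStepA (0, 2, "")).2.2 = pvElem i := by
  rw [pvToChars_nonneg i h]
  have h2 : (2 : Int) = 2 + (((0 % 6 : Nat)) : Int) := by norm_num
  rw [h2, pvFoldA i.toNat 0 0 ""]
  unfold pvElem
  norm_num

theorem pvA_map (desde hasta : Int) (h : 0 ≤ desde ∨ hasta ≤ desde) :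
    generarut desde hasta = (PySem.List.pyRange desde hasta 1).map pvElem := by
  rw [pvGenerarut_eq, PySem.List.foldl_append_singleton_eq_map, List.nil_append]
  refine List.map_congr_left ?_
  intro i hi
  rw [PySem.List.mem_pyRange_one] at hi
  exact pvA_elem i (by rcases h with h | h <;> omega)

-- Source B's digit initialisation equals pvND.
theorem pvND_eq_map (n : Nat) :
    (pvD n).reverse.map (fun c => (PySem.Int.ofChars? [c]).getD 0) = pvND n := by
  induction n using Nat.strong_induction_on with
  | _ n ih =>
    by_cases h : n < 10
    · rw [pvD_small h, pvND_small h]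
      simp [pvOfChars_digitChar n h]
    · rw [pvD_large h, pvND_large h]
      simp only [List.reverse_append, List.reverse_singleton, List.singleton_append,
        List.map_cons, pvOfChars_digitChar (n % 10) (Nat.mod_lt n (by omega)),
        Option.getD_some, ih (n / 10) (Nat.div_lt_self (by omega) (by omega))]

-- Source B's enumerate-sum equals pvWS.
theorem pvEnumSum (ds : List Int) : ∀ (k : Nat) (acc : Int),
    (PySem.List.enumerate ds (k : Int)).foldl
        (fun acc p => acc + p.2 * (2 + PySem.Int.mod p.1 6)) acc = acc + pvWS k ds := by
  induction ds with
  | nil => intro k acc; simp [PySem.List.enumerate_nil, pvWS]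
  | cons d r ih =>
    intro k acc
    rw [PySem.List.enumerate_cons, List.foldl_cons]
    have hk : ((k : Int) + 1) = ((k + 1 : Nat) : Int) := by push_cast; ring
    rw [hk, ih (k + 1)]
    simp only [pvWS, pvModCast]
    push_cast
    ring

-- The carry step maps the digit list of n to that of n+1 and returns the change of pvWS.
theorem pvInc_spec (n : Nat) : ∀ (k : Nat),
    pvInc (pvND n) (k : Int) = (pvND (n + 1), pvWS k (pvND (n + 1)) - pvWS k (pvND n)) := by
  induction n using Nat.strong_induction_on with
  | _ n ih =>
    intro k
    by_cases h : n < 10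
    · rw [pvND_small h]
      by_cases h9 : n = 9
      · subst h9
        have hk : ((k : Int) + 1) = ((k + 1 : Nat) : Int) := by push_cast; ring
        simp only [pvInc, hk]
        rw [pvND_large (by omega)]
        rw [pvND_small (n := 10 / 10) (by norm_num)]
        norm_num [pvWS, pvModCast]
      · have hne : ((n : Int) == 9) = false := by
          simp only [beq_eq_false_iff_ne, ne_eq]
          omega
        simp only [pvInc, hne, Bool.false_eq_true, if_false]
        rw [pvND_small (by omega)]
        simp only [pvWS, pvModCast, Prod.mk.injEq]
        refine ⟨by push_cast; ring, by push_cast; ring⟩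
    · rw [pvND_large h]
      by_cases h9 : n % 10 = 9
      · have h9' : (((n % 10 : Nat) : Int) == 9) = true := by
          simp only [beq_iff_eq]; omega
        have hk : ((k : Int) + 1) = ((k + 1 : Nat) : Int) := by push_cast; ring
        simp only [pvInc, h9', if_true, hk,
          ih (n / 10) (Nat.div_lt_self (by omega) (by omega)) (k + 1)]
        have e1 : pvND (n + 1) = ((0 : Nat) : Int) :: pvND (n / 10 + 1) := by
          rw [pvND_large (by omega)]
          congr 2 <;> omega
        rw [e1]
        simp only [pvWS, pvModCast, Prod.mk.injEq]
        refine ⟨rfl, ?_⟩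
        rw [h9]
        push_cast
        ring
      · have hne : (((n % 10 : Nat) : Int) == 9) = false := by
          simp only [beq_eq_false_iff_ne, ne_eq]
          have := Nat.mod_lt n (y := 10) (by omega)
          omega
        simp only [pvInc, hne, Bool.false_eq_true, if_false]
        have e1 : pvND (n + 1) = ((n % 10 + 1 : Nat) : Int) :: pvND (n / 10) := by
          rw [pvND_large (by omega)]
          congr 2 <;> omega
        rw [e1]
        simp only [pvWS, pvModCast, Prod.mk.injEq]
        refine ⟨by push_cast; ring, by push_cast; ring⟩

-- The outer loop of Source B produces the mapped range.
theorem pvLoop (fuel : Nat) : ∀ (i : Int) (out : List String), 0 ≤ i →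
    pvGenLoop fuel i (pvND i.toNat) (pvWS 0 (pvND i.toNat)) out
      = out ++ (PySem.List.pyRange i (i + fuel) 1).map pvElem := by
  induction fuel with
  | zero =>
    intro i out _
    rw [PySem.List.pyRange_one_eq_nil (by norm_num)]
    simp [pvGenLoop]
  | succ f ih =>
    intro i out hi
    simp only [pvGenLoop, pvDv3]
    rw [show pvInc (pvND i.toNat) 0
        = (pvND (i.toNat + 1), pvWS 0 (pvND (i.toNat + 1)) - pvWS 0 (pvND i.toNat))
        from pvInc_spec i.toNat 0]
    dsimp only
    rw [show i.toNat + 1 = (i + 1).toNat by omega,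
      show pvWS 0 (pvND i.toNat) + (pvWS 0 (pvND ((i + 1).toNat)) - pvWS 0 (pvND i.toNat))
        = pvWS 0 (pvND ((i + 1).toNat)) from by ring,
      ih (i + 1) _ (by omega),
      show PySem.Int.toStr i ++ pvDv (pvWS 0 (pvND i.toNat)) = pvElem i from rfl]
    have hcons : i < i + ((f + 1 : Nat) : Int) := by
      have : (0 : Int) < ((f + 1 : Nat) : Int) := by exact_mod_cast Nat.succ_pos f
      omega
    conv_rhs => rw [PySem.List.pyRange_one_cons hcons]
    simp only [List.map_cons, List.append_assoc, List.singleton_append]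
    congr 3
    push_cast
    ring

-- ===== VERDICT (by name: the statement is the Claim_ definition above) =====
theorem generarut_spec : Claim_equal_generarut := by
  intro desde hasta _ hpre
  unfold Spec_generarut generarut_alt
  by_cases hlt : desde ≥ hasta
  · rw [if_pos hlt, pvGenerarut_eq, PySem.List.pyRange_one_eq_nil (by omega)]
    rfl
  · rw [if_neg hlt]
    have h0 : 0 ≤ desde := by rcases hpre with h | h <;> omega
    simp only [pvToChars_nonneg desde h0, pvND_eq_map]
    have he := pvEnumSum (pvND desde.toNat) 0 0
    simp only [Nat.cast_zero, zero_add] at he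
    rw [he, pvLoop _ desde [] h0, List.nil_append]
    rw [pvA_map desde hasta hpre]
    congr 2
    omega
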